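-- pv_equiv track=rewrite | github.com/mulinfro/slot_combination | engine/parse.py | get_set_product_with_slices
-- ===== SOURCE A (Python) =====
-- def count_tag_num(e):
--     if not e: t = 0
--     else:     t = e.strip("#").count("#") + 1
--     return t
--
-- def get_list_product_with_slices(lst_of_lst, perm = None):
--     ans = [("", (), perm)]
--     for lst in lst_of_lst:
--         new_ans = []
--         for e, f, _ in ans:
--             for e2 in lst:
--                 if e2 == "":
--                     new_ans.append((e, f + (0,), perm))
--                 else:
--                     new_ans.append((("%s#%s"%(e, e2)).strip("#"), f + (count_tag_num(e2),), perm))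
--         ans = new_ans
--     return ans
--
-- def get_list_permutation(perm, lst):
--     new_lst = []
--     for p in perm:
--         new_lst.append(lst[p - 1])
--     return new_lst
--
-- def get_set_product_with_slices(lst_of_lst):
--     from itertools import permutations
--     ans = []
--     enum = list(range(1, len(lst_of_lst) + 1))
--     for perm in permutations(enum):
--         p_lst = get_list_permutation(perm, lst_of_lst)
--         ans.extend(get_list_product_with_slices(p_lst, perm=perm))
--
--     return list(set(ans))
-- ===== SOURCE B (Python) =====
-- def get_set_product_with_slices(lst_of_lst):
--     # Enumerates each permuted cartesian product combination directly with
--     # itertools.product, folding each combination once and adding it to the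
--     # result set on the fly (no per-level rebuild of a growing answer list).
--     from itertools import permutations, product
--     seen = set()
--     for perm in permutations(range(1, len(lst_of_lst) + 1)):
--         p_lst = [lst_of_lst[p - 1] for p in perm]
--         for combo in product(*p_lst):
--             s = ""
--             counts = ()
--             for e2 in combo:
--                 if e2 == "":
--                     counts += (0,)
--                 else:
--                     s = ("%s#%s" % (s, e2)).strip("#")
--                     counts += (e2.strip("#").count("#") + 1,)
--             seen.add((s, counts, perm))
--     return list(seen)
-- ===== Notes on version B (the rewrite author's own statement) =====
-- stated objective: alternative
-- what changed: Replaces A's per-permutation level-by-level rebuild of the whole partial-answer list followed by one final set() pass with direct per-combination enumeration via itertools.product, folding each combination once and adding it straight to the result set.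
import Mathlib
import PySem

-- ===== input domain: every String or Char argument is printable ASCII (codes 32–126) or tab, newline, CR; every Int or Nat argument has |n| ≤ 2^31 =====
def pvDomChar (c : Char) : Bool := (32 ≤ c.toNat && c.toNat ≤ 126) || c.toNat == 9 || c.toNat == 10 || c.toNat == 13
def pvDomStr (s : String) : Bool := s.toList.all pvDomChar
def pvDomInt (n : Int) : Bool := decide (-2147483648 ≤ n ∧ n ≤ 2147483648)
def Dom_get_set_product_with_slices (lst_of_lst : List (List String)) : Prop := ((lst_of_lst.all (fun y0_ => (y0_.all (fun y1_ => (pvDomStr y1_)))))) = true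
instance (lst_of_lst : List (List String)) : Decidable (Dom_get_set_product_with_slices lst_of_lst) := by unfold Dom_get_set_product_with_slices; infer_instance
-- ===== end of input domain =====

-- B enumerates each permuted cartesian-product combination directly (itertools.product) and
-- deduplicates on the fly, instead of A's level-by-level rebuild plus one final set() pass.
-- Python A returns list(set(...)) whose iteration order is hash-dependent; both ports model the
-- set as PySem.Set (distinct elements, first-occurrence order), per the type convention.

-- ===== PORT A =====
def count_tag_num (e : String) : Int :=
  if e = "" then 0 else ((PySem.Str.count (PySem.Str.stripChars e "#") "#" : Int) + 1)

def get_list_product_with_slices (lst_of_lst : List (List String)) (perm : List Int) :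
    List (String × List Int × List Int) :=
  lst_of_lst.foldl (fun ans lst =>
    ans.foldl (fun new_ans t =>
      lst.foldl (fun na e2 =>
        if e2 = "" then na ++ [(t.1, t.2.1 ++ [(0 : Int)], perm)]
        else na ++ [(PySem.Str.stripChars (PySem.Str.join "#" [t.1, e2]) "#",
                     t.2.1 ++ [count_tag_num e2], perm)]) new_ans) [])
    [("", [], perm)]

-- lst[p-1]: p ranges over 1..len(lst), so the index is always in range; getD is never hit.
def get_list_permutation (perm : List Int) (lst : List (List String)) : List (List String) :=
  perm.foldl (fun new_lst p => new_lst ++ [(PySem.List.pyGet? lst (p - 1)).getD []]) []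

def get_set_product_with_slices (lst_of_lst : List (List String)) :
    List (String × List Int × List Int) :=
  let enum := PySem.List.pyRange 1 ((lst_of_lst.length : Int) + 1) 1
  let ans := (PySem.List.permutations enum enum.length).foldl
      (fun acc perm =>
        acc ++ get_list_product_with_slices (get_list_permutation perm lst_of_lst) perm) []
  PySem.Set.ofList ans

-- ===== PORT B =====
def pvProduct : List (List String) → List (List String)
  | [] => [[]]
  | l :: ls => l.flatMap (fun x => (pvProduct ls).map (fun c => x :: c))

def pvComboStep (sc : String × List Int) (e2 : String) : String × List Int :=
  if e2 = "" then (sc.1, sc.2 ++ [(0 : Int)])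
  else (PySem.Str.stripChars (PySem.Str.join "#" [sc.1, e2]) "#",
        sc.2 ++ [((PySem.Str.count (PySem.Str.stripChars e2 "#") "#" : Int) + 1)])

def pvComboFold (combo : List String) : String × List Int :=
  combo.foldl pvComboStep ("", [])

def get_set_product_with_slices_alt (lst_of_lst : List (List String)) :
    List (String × List Int × List Int) :=
  let enum := PySem.List.pyRange 1 ((lst_of_lst.length : Int) + 1) 1
  (PySem.List.permutations enum enum.length).foldl
    (fun seen perm =>
      let p_lst := perm.map (fun p => (PySem.List.pyGet? lst_of_lst (p - 1)).getD [])
      (pvProduct p_lst).foldl (fun seen combo =>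
        let fc := pvComboFold combo
        PySem.Set.add seen (fc.1, fc.2, perm)) seen)
    (PySem.Set.empty : PySem.Set (String × List Int × List Int))

-- ===== PRECONDITION & SPEC =====
def Spec_get_set_product_with_slices (lst_of_lst : List (List String)) (out : List (String × List Int × List Int)) : Prop := out = get_set_product_with_slices_alt lst_of_lst
instance (lst_of_lst : List (List String)) (out : List (String × List Int × List Int)) : Decidable (Spec_get_set_product_with_slices lst_of_lst out) := by unfold Spec_get_set_product_with_slices; infer_instance

-- ===== CLAIM (what is proved, stated in full; the proofs are below) =====
def Claim_equal_get_set_product_with_slices : Prop := ∀ (lst_of_lst : List (List String)), Dom_get_set_product_with_slices lst_of_lst → Spec_get_set_product_with_slices lst_of_lst (get_set_product_with_slices lst_of_lst)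

-- ===== LEMMAS AND PROOFS =====

-- A's inner two loops over one level: extend every partial tuple by every element of lst.
theorem pvA_level (lst : List String) (perm : List Int)
    (ans : List (String × List Int × List Int)) :
    ans.foldl (fun new_ans t =>
      lst.foldl (fun na e2 =>
        if e2 = "" then na ++ [(t.1, t.2.1 ++ [(0 : Int)], perm)]
        else na ++ [(PySem.Str.stripChars (PySem.Str.join "#" [t.1, e2]) "#",
                     t.2.1 ++ [count_tag_num e2], perm)]) new_ans) []
    = ans.flatMap (fun t => lst.map (fun e2 =>
        ((pvComboStep (t.1, t.2.1) e2).1, (pvComboStep (t.1, t.2.1) e2).2, perm))) := by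
  have hinner : ∀ (t : String × List Int × List Int) (acc : List (String × List Int × List Int)),
      lst.foldl (fun na e2 =>
        if e2 = "" then na ++ [(t.1, t.2.1 ++ [(0 : Int)], perm)]
        else na ++ [(PySem.Str.stripChars (PySem.Str.join "#" [t.1, e2]) "#",
                     t.2.1 ++ [count_tag_num e2], perm)]) acc
      = acc ++ lst.map (fun e2 =>
          ((pvComboStep (t.1, t.2.1) e2).1, (pvComboStep (t.1, t.2.1) e2).2, perm)) := by
    intro t acc
    have := PySem.List.foldl_append_singleton_eq_map
      (l := lst) (acc := acc)
      (f := fun e2 => ((pvComboStep (t.1, t.2.1) e2).1, (pvComboStep (t.1, t.2.1) e2).2, perm))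
    rw [← this]
    apply PySem.List.foldl_congr_mem
    intro na e2 _
    by_cases h : e2 = "" <;> simp [pvComboStep, count_tag_num, h]
  calc ans.foldl (fun new_ans t =>
        lst.foldl (fun na e2 =>
          if e2 = "" then na ++ [(t.1, t.2.1 ++ [(0 : Int)], perm)]
          else na ++ [(PySem.Str.stripChars (PySem.Str.join "#" [t.1, e2]) "#",
                       t.2.1 ++ [count_tag_num e2], perm)]) new_ans) []
      = ans.foldl (fun new_ans t => new_ans ++ lst.map (fun e2 =>
          ((pvComboStep (t.1, t.2.1) e2).1, (pvComboStep (t.1, t.2.1) e2).2, perm))) [] := by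
        exact PySem.List.foldl_congr_mem ans _ _ [] (fun acc t _ => hinner t acc)
    _ = _ := by
        simpa using PySem.List.foldl_append_eq_flatMap
          (l := ans) (acc := [])
          (g := fun t => lst.map (fun e2 =>
            ((pvComboStep (t.1, t.2.1) e2).1, (pvComboStep (t.1, t.2.1) e2).2, perm)))

-- A's whole per-permutation fold from an arbitrary tagged state equals continuing the
-- per-combination fold from each state over the cartesian product of the remaining lists.
theorem pvA_fold (L : List (List String)) (perm : List Int)
    (S : List (String × List Int)) :
    L.foldl (fun ans lst =>
      ans.foldl (fun new_ans t =>
        lst.foldl (fun na e2 =>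
          if e2 = "" then na ++ [(t.1, t.2.1 ++ [(0 : Int)], perm)]
          else na ++ [(PySem.Str.stripChars (PySem.Str.join "#" [t.1, e2]) "#",
                       t.2.1 ++ [count_tag_num e2], perm)]) new_ans) [])
      (S.map (fun t => (t.1, t.2, perm)))
    = S.flatMap (fun t => (pvProduct L).map (fun c =>
        ((c.foldl pvComboStep t).1, (c.foldl pvComboStep t).2, perm))) := by
  induction L generalizing S with
  | nil =>
    simp only [List.foldl_nil, pvProduct, List.map_cons, List.map_nil]
    induction S with
    | nil => rfl
    | cons x xs ihS => simp [ihS]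
  | cons lst ls ih =>
    have hstep := pvA_level lst perm (S.map (fun t => (t.1, t.2, perm)))
    rw [List.foldl_cons, hstep]
    have hrw : (S.map (fun t => (t.1, t.2, perm))).flatMap (fun t => lst.map (fun e2 =>
        ((pvComboStep (t.1, t.2.1) e2).1, (pvComboStep (t.1, t.2.1) e2).2, perm)))
      = (S.flatMap (fun t => lst.map (fun e2 => pvComboStep t e2))).map
          (fun t => (t.1, t.2, perm)) := by
      simp [List.flatMap_map, List.map_flatMap, Function.comp_def]
    rw [hrw, ih]
    simp [pvProduct, List.flatMap_map, List.map_flatMap, List.flatMap_assoc, Function.comp_def]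

theorem pvA_product (L : List (List String)) (perm : List Int) :
    get_list_product_with_slices L perm
    = (pvProduct L).map (fun c => ((pvComboFold c).1, (pvComboFold c).2, perm)) := by
  have h := pvA_fold L perm [(("" : String), ([] : List Int))]
  simpa [get_list_product_with_slices, pvComboFold] using h

theorem pvA_perm_list (perm : List Int) (lst : List (List String)) :
    get_list_permutation perm lst
    = perm.map (fun p => (PySem.List.pyGet? lst (p - 1)).getD []) := by
  simpa [get_list_permutation] using PySem.List.foldl_append_singleton_eq_map
    (l := perm) (acc := ([] : List (List String)))
    (f := fun p => (PySem.List.pyGet? lst (p - 1)).getD [])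

-- B's inner fold adds every tagged combination to the seen set in order.
theorem pvB_inner (combos : List (List String)) (perm : List Int)
    (seen : PySem.Set (String × List Int × List Int)) :
    combos.foldl (fun seen combo =>
      PySem.Set.add seen ((pvComboFold combo).1, (pvComboFold combo).2, perm)) seen
    = PySem.Set.update seen (combos.map
        (fun c => ((pvComboFold c).1, (pvComboFold c).2, perm))) := by
  rw [PySem.Set.update, List.foldl_map]

-- B's outer fold over the permutations accumulates Set.ofList of all tagged combinations.
theorem pvB_outer (ps : List (List Int)) (h : List Int → List (List String))
    (s : PySem.Set (String × List Int × List Int)) :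
    ps.foldl (fun seen perm =>
      (h perm).foldl (fun seen combo =>
        PySem.Set.add seen ((pvComboFold combo).1, (pvComboFold combo).2, perm)) seen) s
    = PySem.Set.update s (ps.flatMap (fun perm => (h perm).map
        (fun c => ((pvComboFold c).1, (pvComboFold c).2, perm)))) := by
  induction ps generalizing s with
  | nil => simp [PySem.Set.update]
  | cons p ps ih =>
    rw [List.foldl_cons, pvB_inner, ih]
    simp [PySem.Set.update_append]

-- ===== VERDICT (by name: the statement is the Claim_ definition above) =====
theorem get_set_product_with_slices_spec : Claim_equal_get_set_product_with_slices := by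
  intro lst_of_lst _
  unfold Spec_get_set_product_with_slices
  unfold get_set_product_with_slices get_set_product_with_slices_alt
  simp only []
  rw [pvB_outer _ (fun perm => pvProduct (perm.map (fun p => (PySem.List.pyGet? lst_of_lst (p - 1)).getD []))) PySem.Set.empty]
  have hflat := PySem.List.foldl_append_eq_flatMap
    (l := PySem.List.permutations (PySem.List.pyRange 1 ((lst_of_lst.length : Int) + 1) 1)
            (PySem.List.pyRange 1 ((lst_of_lst.length : Int) + 1) 1).length)
    (acc := ([] : List (String × List Int × List Int)))
    (g := fun perm => get_list_product_with_slices (get_list_permutation perm lst_of_lst) perm)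
  rw [hflat]
  simp only [List.nil_append]
  have hupd : ∀ xs : List (String × List Int × List Int),
      PySem.Set.update (PySem.Set.empty) xs = PySem.Set.ofList xs := by
    intro xs; rfl
  rw [hupd]
  congr 1
  apply List.flatMap_congr
  intro perm _
  rw [pvA_perm_list, pvA_product]
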